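-- pv_equiv track=rewrite | github.com/chrisjwood16/openprescribing-analyse-to-api | analyse-to-api.py | check_for_mixed_code_types
-- ===== SOURCE A (Python) =====
-- def check_for_mixed_code_types(codes):
--     has_vmp = False
--     has_shorter_code = False
--
--     for code in codes:
--         if len(code) == 15:
--             has_vmp = True
--         elif len(code) < 15:
--             has_shorter_code = True
--
--     if has_vmp and has_shorter_code:
--         return True
--     else:
--         return False
-- ===== SOURCE B (Python) =====
-- def check_for_mixed_code_types(codes):
--     # Keep only lengths that can matter (>15 is ignored by the task);
--     # mixed types present iff the extremes of that list are 15 and something smaller.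
--     relevant = [len(code) for code in codes if len(code) <= 15]
--     return bool(relevant) and min(relevant) < max(relevant) == 15
-- ===== Notes on version B (the rewrite author's own statement) =====
-- stated objective: alternative
-- what changed: Instead of tracking two boolean flags per element, B filters the lengths down to those <= 15 and decides by a min/max aggregation: mixed types exist iff min(relevant) < max(relevant) == 15.
import Mathlib
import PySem

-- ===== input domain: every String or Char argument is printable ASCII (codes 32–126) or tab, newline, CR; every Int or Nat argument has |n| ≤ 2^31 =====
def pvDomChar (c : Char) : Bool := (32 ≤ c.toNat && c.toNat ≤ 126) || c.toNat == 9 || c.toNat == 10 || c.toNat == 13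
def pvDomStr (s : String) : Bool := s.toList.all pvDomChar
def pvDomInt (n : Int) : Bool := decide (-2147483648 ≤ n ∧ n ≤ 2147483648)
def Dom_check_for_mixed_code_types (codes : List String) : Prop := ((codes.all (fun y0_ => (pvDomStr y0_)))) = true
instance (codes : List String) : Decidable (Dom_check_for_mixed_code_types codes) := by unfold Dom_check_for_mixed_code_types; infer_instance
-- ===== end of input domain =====

-- B decides via a min/max aggregation over the filtered lengths (≤ 15) instead of A's two running flags (alternative decomposition, same cost).


-- ===== PORT A =====
def check_for_mixed_code_types (codes : List String) : Bool :=
  let st := codes.foldl (fun (st : Bool × Bool) code =>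
    if code.toList.length = 15 then (true, st.2)
    else if code.toList.length < 15 then (st.1, true)
    else st) (false, false)
  if st.1 && st.2 then true else false

-- ===== PORT B =====
def check_for_mixed_code_types_alt (codes : List String) : Bool :=
  let relevant : List Nat :=
    codes.filterMap (fun code =>
      if code.toList.length ≤ 15 then some code.toList.length else none)
  match PySem.List.min? relevant (fun x => x), PySem.List.max? relevant (fun x => x) with
  | some mn, some mx => decide (mn < mx) && decide (mx = 15)
  | _, _ => false

-- ===== PRECONDITION & SPEC =====
def Spec_check_for_mixed_code_types (codes : List String) (out : Bool) : Prop := out = check_for_mixed_code_types_alt codes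
instance (codes : List String) (out : Bool) : Decidable (Spec_check_for_mixed_code_types codes out) := by unfold Spec_check_for_mixed_code_types; infer_instance

-- ===== CLAIM (what is proved, stated in full; the proofs are below) =====
def Claim_equal_check_for_mixed_code_types : Prop := ∀ (codes : List String), Dom_check_for_mixed_code_types codes → Spec_check_for_mixed_code_types codes (check_for_mixed_code_types codes)

-- ===== LEMMAS AND PROOFS =====

-- A's loop flags are exactly the two existential facts about lengths.
theorem pv_foldl_flags (codes : List String) (b1 b2 : Bool) :
    codes.foldl (fun (st : Bool × Bool) code =>
      if code.toList.length = 15 then (true, st.2)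
      else if code.toList.length < 15 then (st.1, true)
      else st) (b1, b2)
    = (b1 || codes.any (fun c => c.toList.length = 15),
       b2 || codes.any (fun c => c.toList.length < 15)) := by
  induction codes generalizing b1 b2 with
  | nil => simp
  | cons c cs ih =>
    rw [List.foldl_cons, List.any_cons, List.any_cons]
    by_cases h15 : c.toList.length = 15
    · have hn : ¬ c.toList.length < 15 := by omega
      rw [if_pos h15, ih]
      simp only [String.length_toList] at h15 hn
      simp [h15]
    · by_cases hlt : c.toList.length < 15
      · rw [if_neg h15, if_pos hlt, ih]
        simp only [String.length_toList] at h15 hlt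
        simp [h15, hlt]
      · rw [if_neg h15, if_neg hlt, ih]
        simp only [String.length_toList] at h15 hlt
        simp [h15, hlt]

-- membership in B's filtered length list
theorem pv_mem_relevant (codes : List String) (x : Nat) :
    x ∈ codes.filterMap (fun code =>
        if code.toList.length ≤ 15 then some code.toList.length else none)
      ↔ (∃ c ∈ codes, c.toList.length = x) ∧ x ≤ 15 := by
  constructor
  · intro hmem
    obtain ⟨c, hc, h⟩ := List.mem_filterMap.1 hmem
    by_cases hle : c.toList.length ≤ 15
    · rw [if_pos hle] at h
      obtain rfl : c.toList.length = x := Option.some.inj h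
      exact ⟨⟨c, hc, rfl⟩, hle⟩
    · rw [if_neg hle] at h; cases h
  · rintro ⟨⟨c, hc, hx⟩, hle⟩
    refine List.mem_filterMap.2 ⟨c, hc, ?_⟩
    rw [hx, if_pos hle]

-- B computes the same two existential facts.
theorem pv_b_eq (codes : List String) :
    check_for_mixed_code_types_alt codes
    = ((codes.any fun c => decide (c.toList.length = 15)) && codes.any fun c => decide (c.toList.length < 15)) := by
  unfold check_for_mixed_code_types_alt
  set R := codes.filterMap (fun code =>
      if code.toList.length ≤ 15 then some code.toList.length else none) with hR
  rcases hmn : PySem.List.min? R (fun x => x) with _ | mn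
  · -- empty relevant list: no code of length ≤ 15, so no code of length 15
    have hnil : R = [] := (PySem.List.min?_eq_none_iff R (fun x => x)).1 hmn
    have hmx : PySem.List.max? R (fun x => x) = none := (PySem.List.max?_eq_none_iff R (fun x => x)).2 hnil
    simp only [hmn, hmx]
    have : codes.any (fun c => decide (c.toList.length = 15)) = false := by
      rw [List.any_eq_false]
      intro c hc hdec
      have h15 : c.toList.length = 15 := by simpa using hdec
      have : (15 : Nat) ∈ R := (pv_mem_relevant codes 15).2 ⟨⟨c, hc, h15⟩, le_refl _⟩
      rw [hnil] at this; cases this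
    rw [this]; rfl
  · rcases hmx : PySem.List.max? R (fun x => x) with _ | mx
    · have hnil : R = [] := (PySem.List.max?_eq_none_iff R (fun x => x)).1 hmx
      rw [hnil, (PySem.List.min?_eq_none_iff [] (fun x => x)).2 rfl] at hmn
      cases hmn
    · have hmnR : mn ∈ R := PySem.List.min?_mem hmn
      have hmxR : mx ∈ R := PySem.List.max?_mem hmx
      simp only [hmn, hmx]
      rw [Bool.eq_iff_iff]
      simp only [Bool.and_eq_true, decide_eq_true_eq, List.any_eq_true]
      constructor
      · rintro ⟨hlt, h15⟩
        obtain ⟨⟨c, hc, hcx⟩, _⟩ := (pv_mem_relevant codes mx).1 hmxR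
        obtain ⟨⟨d, hd, hdx⟩, _⟩ := (pv_mem_relevant codes mn).1 hmnR
        exact ⟨⟨c, hc, by simp [hcx, h15]⟩, ⟨d, hd, by simp [hdx]; omega⟩⟩
      · rintro ⟨⟨c, hc, hc15⟩, ⟨d, hd, hdlt⟩⟩
        have h15R : (15 : Nat) ∈ R := (pv_mem_relevant codes 15).2 ⟨⟨c, hc, hc15⟩, le_refl _⟩
        have hdR : d.toList.length ∈ R :=
          (pv_mem_relevant codes d.toList.length).2 ⟨⟨d, hd, rfl⟩, by omega⟩
        have hmx15 : (15 : Nat) ≤ mx := PySem.List.max?_isMax hmx 15 h15R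
        have hmxle : mx ≤ 15 := ((pv_mem_relevant codes mx).1 hmxR).2
        have hmnle : mn ≤ d.toList.length := PySem.List.min?_isMin hmn _ hdR
        exact ⟨by omega, by omega⟩

-- ===== VERDICT (by name: the statement is the Claim_ definition above) =====
theorem check_for_mixed_code_types_spec : Claim_equal_check_for_mixed_code_types := by
  intro codes _
  unfold Spec_check_for_mixed_code_types check_for_mixed_code_types
  rw [pv_foldl_flags, pv_b_eq]
  simp only [Bool.false_or]
  split_ifs with h
  · exact h.symm
  · simp only [Bool.not_eq_true] at h
    exact h.symm
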